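-- pv_equiv track=rewrite | github.com/TopeEstLa/nsi-epreuves-pratiques | BCG_NSI_39.py | pantheon
-- ===== SOURCE A (Python) =====
-- def pantheon(eleves, notes):
--     """
--     Calcule le panthéon des élèves.
--     :param eleves:
--     :param notes:
--     :return:
--     """
--     note_maxi = 0
--     meilleur_eleves = []
--     for i in range(len(eleves)):
--         if notes[i] > note_maxi:
--             note_maxi = notes[i]
--             meilleur_eleves = [eleves[i]]
--         elif notes[i] == note_maxi:
--             meilleur_eleves.append(eleves[i])
--
--     return note_maxi, meilleur_eleves
-- ===== SOURCE B (Python) =====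
-- def pantheon(eleves, notes):
--     """
--     Calcule le pantheon des eleves.
--     Two passes: best grade (floored at 0), then the students achieving it.
--     """
--     relevant = [notes[i] for i in range(len(eleves))]
--     note_maxi = max([0] + relevant)
--     meilleur_eleves = [e for e, v in zip(eleves, relevant) if v == note_maxi]
--     return note_maxi, meilleur_eleves
-- ===== Notes on version B (the rewrite author's own statement) =====
-- stated objective: simpler
-- what changed: Replaces the single running-max-with-list-reset loop by two plain passes: the maximum grade floored at 0 (max([0]+relevant)), then a comprehension filtering the students whose grade equals it.
import Mathlib
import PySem

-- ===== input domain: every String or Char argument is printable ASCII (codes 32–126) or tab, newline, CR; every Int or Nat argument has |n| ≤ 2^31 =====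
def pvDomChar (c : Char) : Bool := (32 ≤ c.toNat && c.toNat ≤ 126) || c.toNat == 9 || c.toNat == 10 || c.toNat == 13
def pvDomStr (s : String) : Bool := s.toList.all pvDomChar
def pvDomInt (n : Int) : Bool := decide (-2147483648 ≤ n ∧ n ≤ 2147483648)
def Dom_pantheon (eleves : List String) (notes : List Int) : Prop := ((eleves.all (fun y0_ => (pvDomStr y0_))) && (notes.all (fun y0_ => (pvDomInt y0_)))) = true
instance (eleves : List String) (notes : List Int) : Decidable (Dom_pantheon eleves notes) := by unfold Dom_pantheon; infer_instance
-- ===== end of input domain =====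

-- B changes the one-pass running-max-with-reset loop into two passes (max floored at 0, then a filter); return value only, no mutation.

-- ===== PORT A =====
-- literal port of A's single loop over range(len(eleves)) carrying (note_maxi, meilleur_eleves)
def pantheon (eleves : List String) (notes : List Int) : Int × List String :=
  (PySem.List.pyRange 0 (eleves.length : Int) 1).foldl
    (fun st i =>
      if st.1 < PySem.List.pyGetD notes i 0 then
        (PySem.List.pyGetD notes i 0, [PySem.List.pyGetD eleves i ""])
      else if PySem.List.pyGetD notes i 0 = st.1 then
        (st.1, st.2 ++ [PySem.List.pyGetD eleves i ""])
      else st)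
    (0, [])

-- ===== PORT B =====
-- port of Source B: relevant = [notes[i] for i in range(len(eleves))]; note_maxi = max([0]+relevant); filter by zip
def pantheon_alt (eleves : List String) (notes : List Int) : Int × List String :=
  let relevant := (PySem.List.pyRange 0 (eleves.length : Int) 1).map (fun i => PySem.List.pyGetD notes i 0)
  let noteMaxi := relevant.foldl (fun a v => max a v) 0
  let meilleurs := ((eleves.zip relevant).filter (fun p => p.2 = noteMaxi)).map Prod.fst
  (noteMaxi, meilleurs)

-- ===== PRECONDITION & SPEC =====
-- Pre_ excludes exactly the inputs where Python A raises IndexError: notes shorter than eleves.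
def Pre_pantheon (eleves : List String) (notes : List Int) : Prop :=
  eleves.length ≤ notes.length
instance (eleves : List String) (notes : List Int) : Decidable (Pre_pantheon eleves notes) := by unfold Pre_pantheon; infer_instance

def pvWitness_pantheon : List String × List Int := (["ada", "bob", "eve"], [12, 20, 20])

def Spec_pantheon (eleves : List String) (notes : List Int) (out : Int × List String) : Prop := out = pantheon_alt eleves notes
instance (eleves : List String) (notes : List Int) (out : Int × List String) : Decidable (Spec_pantheon eleves notes out) := by unfold Spec_pantheon; infer_instance

-- ===== CLAIM (what is proved, stated in full; the proofs are below) =====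
def Claim_equal_pantheon : Prop := ∀ (eleves : List String) (notes : List Int), Dom_pantheon eleves notes → Pre_pantheon eleves notes → Spec_pantheon eleves notes (pantheon eleves notes)

-- ===== LEMMAS AND PROOFS =====

-- A's loop body on a precomputed (student, grade) pair
def bodyA (st : Int × List String) (p : String × Int) : Int × List String :=
  if st.1 < p.2 then (p.2, [p.1])
  else if p.2 = st.1 then (st.1, st.2 ++ [p.1])
  else st

lemma le_foldl_max (pairs : List (String × Int)) (m : Int) :
    m ≤ pairs.foldl (fun a p => max a p.2) m := by
  induction pairs generalizing m with
  | nil => simp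
  | cons p rest ih => exact le_trans (le_max_left m p.2) (ih (max m p.2))

-- characterisation of A's loop: it computes the running max and the students equal to it
lemma loopA_char (pairs : List (String × Int)) (m : Int) (acc : List String) :
    pairs.foldl bodyA (m, acc)
      = (pairs.foldl (fun a p => max a p.2) m,
         (if pairs.foldl (fun a p => max a p.2) m = m then acc else [])
           ++ (pairs.filter (fun p => p.2 = pairs.foldl (fun a p => max a p.2) m)).map Prod.fst) := by
  induction pairs generalizing m acc with
  | nil => simp
  | cons p rest ih =>
    simp only [List.foldl_cons]
    by_cases hlt : m < p.2
    · have hb : bodyA (m, acc) p = (p.2, [p.1]) := by simp [bodyA, hlt]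
      have hm : max m p.2 = p.2 := max_eq_right (le_of_lt hlt)
      rw [hb, ih]; simp only [hm]
      have hMm : rest.foldl (fun a p => max a p.2) p.2 ≠ m := by
        have := le_foldl_max rest p.2; omega
      by_cases hpM : p.2 = rest.foldl (fun a p => max a p.2) p.2
      · simp [decide_eq_true hpM, if_pos hpM.symm, if_neg hMm]
      · simp [decide_eq_false hpM, if_neg (Ne.symm hpM), if_neg hMm]
    · by_cases heq : p.2 = m
      · have hb : bodyA (m, acc) p = (m, acc ++ [p.1]) := by simp [bodyA, heq]
        have hm : max m p.2 = m := by omega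
        rw [hb, ih]; simp only [hm]
        by_cases hMm : rest.foldl (fun a p => max a p.2) m = m
        · simp [heq, hMm]
        · have : ¬ p.2 = rest.foldl (fun a p => max a p.2) m := by rw [heq]; exact fun h => hMm h.symm
          simp [this, hMm]
      · have hb : bodyA (m, acc) p = (m, acc) := by simp [bodyA, hlt, heq]
        have hm : max m p.2 = m := by omega
        rw [hb, ih]; simp only [hm]
        have : ¬ p.2 = rest.foldl (fun a p => max a p.2) m := by
          have := le_foldl_max rest m; omega
        simp [this]

-- the precomputed pair list
def pairsOf (eleves : List String) (notes : List Int) : List (String × Int) :=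
  (List.range eleves.length).map (fun i => (eleves.getD i "", notes.getD i 0))

lemma pantheon_eq_loop (eleves : List String) (notes : List Int) :
    pantheon eleves notes = (pairsOf eleves notes).foldl bodyA (0, []) := by
  unfold pantheon pairsOf
  rw [PySem.List.pyRange_zero_natCast, List.foldl_map, List.foldl_map]
  simp [bodyA]

lemma zip_eq_pairs (eleves : List String) (notes : List Int) :
    eleves.zip ((List.range eleves.length).map (fun i => notes.getD i 0))
      = pairsOf eleves notes := by
  unfold pairsOf
  apply List.ext_getElem
  · simp
  · intro i h1 h2
    simp only [List.getElem_zip, List.getElem_map, List.getElem_range]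
    have hi : i < eleves.length := by simpa using h2
    simp [List.getD_eq_getElem?_getD, List.getElem?_eq_getElem hi]

lemma pantheon_alt_eq (eleves : List String) (notes : List Int) :
    pantheon_alt eleves notes
      = ((pairsOf eleves notes).foldl (fun a p => max a p.2) 0,
         ((pairsOf eleves notes).filter
            (fun p => p.2 = (pairsOf eleves notes).foldl (fun a p => max a p.2) 0)).map Prod.fst) := by
  unfold pantheon_alt
  rw [PySem.List.pyRange_zero_natCast, List.map_map]
  simp only []
  have hrel : (List.range eleves.length).map ((fun i => PySem.List.pyGetD notes i 0) ∘ (fun n : ℕ => (n : Int)))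
      = (List.range eleves.length).map (fun i => notes.getD i 0) := by
    simp [Function.comp, PySem.List.pyGetD_natCast]
  rw [hrel, zip_eq_pairs]
  have hmax : (pairsOf eleves notes).foldl (fun a p => max a p.2) 0
      = ((List.range eleves.length).map (fun i => notes.getD i 0)).foldl (fun a v => max a v) 0 := by
    unfold pairsOf
    rw [List.foldl_map, List.foldl_map]
  rw [← hmax]

-- ===== VERDICT (by name: the statement is the Claim_ definition above) =====
theorem pantheon_spec : Claim_equal_pantheon := by
  intro eleves notes _ _
  unfold Spec_pantheon
  rw [pantheon_eq_loop, pantheon_alt_eq, loopA_char]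
  simp
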